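-- pv_equiv track=rewrite | github.com/josealt2197/PP1 | Proyecto Josué y Jose/ProgramaPrincipal.py | validarEntradaBinario
-- ===== SOURCE A (Python) =====
-- def buscarCaracter(cadena, caracter):
--     indice = 0
--
--     while (indice != len(cadena)):
--         if (cadena[indice] == caracter):
--             return indice
--         indice += 1
--
--     return -1
--
-- def validarEntradaBinario(cadena):
--
--     entradaValida = False
--
--     charBin = "01* "
--
--     if (cadena==""):
--         return "-1"
--     else:
--         indice=0
--         while (indice != len(cadena)):
--             if(buscarCaracter(charBin, cadena[indice])==-1):
--                 return "-2"
--             indice+=1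
--
--         entradaValida = True
--
--     if(entradaValida == True):
--         return cadena
-- ===== SOURCE B (Python) =====
-- def validarEntradaBinario(cadena):
--     if cadena == "":
--         return "-1"
--     conteo = {}
--     for c in cadena:
--         conteo[c] = conteo.get(c, 0) + 1
--     validos = sum(conteo.get(c, 0) for c in "01* ")
--     return cadena if validos == len(cadena) else "-2"
-- ===== Notes on version B (the rewrite author's own statement) =====
-- stated objective: alternative
-- what changed: Instead of short-circuit scanning each character through a linear-search helper, B builds a character-frequency dictionary in one pass and then decides validity arithmetically: the string is valid iff the counts of the four allowed characters sum to the string's length.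
import Mathlib
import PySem

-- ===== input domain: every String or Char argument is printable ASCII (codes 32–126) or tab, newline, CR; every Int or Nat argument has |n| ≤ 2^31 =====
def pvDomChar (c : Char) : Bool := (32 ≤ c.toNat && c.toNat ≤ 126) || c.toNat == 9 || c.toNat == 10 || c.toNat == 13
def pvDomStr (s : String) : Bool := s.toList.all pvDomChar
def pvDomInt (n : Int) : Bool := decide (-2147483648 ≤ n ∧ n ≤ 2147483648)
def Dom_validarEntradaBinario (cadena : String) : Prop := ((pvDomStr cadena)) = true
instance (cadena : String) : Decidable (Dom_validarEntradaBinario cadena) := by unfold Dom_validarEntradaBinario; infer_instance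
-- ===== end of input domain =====

-- B replaces A's short-circuit per-character scan (via a linear-search helper) with a
-- frequency dictionary built in one pass and an arithmetic check: valid iff the counts of
-- the four allowed characters sum to the length (alternative decomposition, same cost).
-- ===== PORT A =====
def buscarCaracterAux (cadena : List Char) (caracter : Char) (indice : Int) : Int :=
  match cadena with
  | [] => -1
  | c :: rest => if c = caracter then indice else buscarCaracterAux rest caracter (indice + 1)

def buscarCaracter (cadena : String) (caracter : Char) : Int :=
  buscarCaracterAux cadena.toList caracter 0

def validarLoop (cadena : String) : List Char → String
  | [] => cadena
  | c :: rest => if buscarCaracter "01* " c = -1 then "-2" else validarLoop cadena rest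

def validarEntradaBinario (cadena : String) : String :=
  if cadena = "" then "-1" else validarLoop cadena cadena.toList

-- ===== PORT B =====
def validarEntradaBinario_alt (cadena : String) : String :=
  if cadena = "" then "-1"
  else
    let conteo := cadena.toList.foldl (fun d c => d.insert c (d.getD c 0 + 1))
      (PySem.Dict.empty : PySem.Dict Char Int)
    let validos := ("01* ".toList.map (fun c => conteo.getD c 0)).sum
    if validos = (cadena.toList.length : Int) then cadena else "-2"

-- ===== PRECONDITION & SPEC =====
def Spec_validarEntradaBinario (cadena : String) (out : String) : Prop := out = validarEntradaBinario_alt cadena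
instance (cadena : String) (out : String) : Decidable (Spec_validarEntradaBinario cadena out) := by unfold Spec_validarEntradaBinario; infer_instance

-- ===== CLAIM (what is proved, stated in full; the proofs are below) =====
def Claim_equal_validarEntradaBinario : Prop := ∀ (cadena : String), Dom_validarEntradaBinario cadena → Spec_validarEntradaBinario cadena (validarEntradaBinario cadena)

-- ===== LEMMAS AND PROOFS =====
lemma busc_eq_neg1 (c : Char) : (buscarCaracter "01* " c = -1) ↔ c ∉ "01* ".toList := by
  simp only [buscarCaracter, buscarCaracterAux, show "01* ".toList = ['0','1','*',' '] from rfl,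
    List.mem_cons, List.not_mem_nil]
  split_ifs <;> simp_all [eq_comm]

lemma loop_eq (cadena : String) (l : List Char) :
    validarLoop cadena l = (if ∀ c ∈ l, c ∈ "01* ".toList then cadena else "-2") := by
  induction l with
  | nil => simp [validarLoop]
  | cons c rest ih =>
    simp only [validarLoop, ih]
    by_cases hc : c ∈ "01* ".toList
    · rw [if_neg (by rw [busc_eq_neg1]; exact fun h => h hc)]
      by_cases hrest : ∀ x ∈ rest, x ∈ "01* ".toList
      · rw [if_pos hrest,
          if_pos (fun x hx => (List.mem_cons.mp hx).elim (fun h => h ▸ hc) (hrest x))]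
      · rw [if_neg hrest,
          if_neg (fun h => hrest (fun x hx => h x (List.mem_cons_of_mem _ hx)))]
    · rw [if_pos (by rw [busc_eq_neg1]; exact hc),
        if_neg (fun h => hc (h c (List.mem_cons_self ..)))]

lemma sum_counts_le (l : List Char) :
    (("01* ".toList.map (fun c => (l.count c : Int))).sum) ≤ l.length := by
  induction l with
  | nil => simp
  | cons x l ih =>
    simp only [show "01* ".toList = ['0','1','*',' '] from rfl, List.map_cons, List.map_nil,
      List.sum_cons, List.sum_nil, List.count_cons, List.length_cons] at *
    push_cast at *
    split_ifs <;> simp_all <;> omega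

lemma sum_counts_cons (x : Char) (l : List Char) :
    (("01* ".toList.map (fun c => ((x :: l).count c : Int))).sum)
      = ("01* ".toList.map (fun c => (l.count c : Int))).sum
        + (if x ∈ "01* ".toList then 1 else 0) := by
  simp only [show "01* ".toList = ['0','1','*',' '] from rfl, List.map_cons, List.map_nil,
    List.sum_cons, List.sum_nil, List.count_cons, List.mem_cons, List.not_mem_nil, or_false]
  push_cast
  split_ifs <;> simp_all <;> omega

lemma sum_counts_iff (l : List Char) :
    (("01* ".toList.map (fun c => (l.count c : Int))).sum = l.length) ↔
    ∀ x ∈ l, x ∈ "01* ".toList := by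
  induction l with
  | nil => simp
  | cons x l ih =>
    rw [sum_counts_cons]
    by_cases hx : x ∈ "01* ".toList
    · rw [if_pos hx]
      constructor
      · intro h y hy
        rcases List.mem_cons.mp hy with e | e
        · exact e ▸ hx
        · refine ih.mp ?_ y e
          simp only [List.length_cons] at h; push_cast at h ⊢; omega
      · intro h
        have hrest := ih.mpr (fun y hy => h y (List.mem_cons_of_mem _ hy))
        simp only [List.length_cons]; push_cast at hrest ⊢; omega
    · rw [if_neg hx]
      have hle := sum_counts_le l
      constructor
      · intro h
        exfalso
        simp only [List.length_cons] at h; push_cast at h hle; omega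
      · intro h
        exact absurd (h x (List.mem_cons_self ..)) hx

lemma conteo_eq (l : List Char) :
    l.foldl (fun d c => d.insert c (d.getD c 0 + 1)) (PySem.Dict.empty : PySem.Dict Char Int)
      = PySem.Dict.counter l :=
  PySem.Dict.foldl_insert_getD_add_one_eq_counter l

-- ===== VERDICT (by name: the statement is the Claim_ definition above) =====
theorem validarEntradaBinario_spec : Claim_equal_validarEntradaBinario := by
  intro cadena _
  unfold Spec_validarEntradaBinario validarEntradaBinario validarEntradaBinario_alt
  by_cases h : cadena = ""
  · simp [h]
  · rw [if_neg h, if_neg h, loop_eq]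
    simp only [conteo_eq, PySem.Dict.getD_counter]
    by_cases hall : ∀ c ∈ cadena.toList, c ∈ "01* ".toList
    · rw [if_pos hall, if_pos ((sum_counts_iff _).mpr hall)]
    · rw [if_neg hall, if_neg (by rw [sum_counts_iff]; exact hall)]
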